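-- pv_equiv track=rewrite | github.com/fadein/2048.py | 2048.py | tilt_field
-- ===== SOURCE A (Python) =====
-- def getnums(f,r=[0,1,2,3],c=[0,1,2,3]):
--     ints=[]
--     for y in r:
--         for x in c:ints.append(f[y][x])
--     return ints
--
-- def sert(f,liste,r=[0,1,2,3],c=[0,1,2,3],reverse=False):
--     pop_from=0
--     if reverse==True:pop_from=-1
--     for y in range(4):
--         for x in range(4):
--             if y in r and x in c:f[y][x]=liste.pop(pop_from)
--     return f
--
-- def get_new_field():
--     f=[]
--     for i in range(4):
--         f.append([])
--         for j in range(4):f[i].append(0)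
--     return f
--
-- def tilt_field(f, cmd):
--     f2=get_new_field()
--     for n in range(4):
--         if cmd=="w":liste=getnums(f,c=[n])
--         if cmd=="a":liste=getnums(f,r=[n])
--         if cmd=="s":liste=getnums(f,c=[n])[::-1]
--         if cmd=="d":liste=getnums(f,r=[n])[::-1]
--         start_len=len(liste)
--         while 0 in liste:
--             liste.remove(0)
--         i=0
--         while i < len(liste) -1:
--             if liste[i] == liste[i + 1]:
--                 liste[i] = liste[i] * 2
--             i = i + 1
--         liste += [0] * (start_len - len(liste))
--         if cmd=="w": liste=sert(f2,liste, c=[n])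
--         if cmd=="a": liste=sert(f2,liste, r=[n])
--         if cmd=="s": liste=sert(f2,liste, c=[n], reverse = True)
--         if cmd=="d": liste=sert(f2,liste, r=[n], reverse = True)
--     return f2
-- ===== SOURCE B (Python) =====
-- def tilt_field(f, cmd):
--     # Coordinate scatter/gather: each line is a list of (y, x) coordinates read in
--     # the tilt direction; slide() is a single recursive pass that emits merged
--     # values while counting zeros (no separate compact / merge / pad stages).
--     def slide(rest, zeros=0):
--         if not rest:
--             return [0] * zeros
--         v, rest = rest[0], rest[1:]
--         if v == 0:
--             return slide(rest, zeros + 1)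
--         nxt = next((w for w in rest if w != 0), None)
--         return [2 * v if v == nxt else v] + slide(rest, zeros)
--
--     def line_coords(k):
--         if cmd == "a":
--             return [(k, x) for x in range(4)]
--         if cmd == "d":
--             return [(k, x) for x in reversed(range(4))]
--         if cmd == "w":
--             return [(y, k) for y in range(4)]
--         if cmd == "s":
--             return [(y, k) for y in reversed(range(4))]
--         # unknown cmd: returns None, the caller then raises (A raises too)
--
--     out = [[0] * 4 for _ in range(4)]
--     for k in range(4):
--         coords = line_coords(k)
--         vals = slide([f[y][x] for y, x in coords])
--         for (y, x), v in zip(coords, vals):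
--             out[y][x] = v
--     return out
-- ===== Notes on version B (the rewrite author's own statement) =====
-- stated objective: alternative
-- what changed: B reads each tilt line as a list of (y,x) coordinates (direction encoded in coordinate order, no transpose/sert grid surgery) and slides it with one recursive pass that looks ahead to the next nonzero and counts zeros, instead of A's staged remove-zeros / index-merge / pad while-loops.
import Mathlib
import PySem

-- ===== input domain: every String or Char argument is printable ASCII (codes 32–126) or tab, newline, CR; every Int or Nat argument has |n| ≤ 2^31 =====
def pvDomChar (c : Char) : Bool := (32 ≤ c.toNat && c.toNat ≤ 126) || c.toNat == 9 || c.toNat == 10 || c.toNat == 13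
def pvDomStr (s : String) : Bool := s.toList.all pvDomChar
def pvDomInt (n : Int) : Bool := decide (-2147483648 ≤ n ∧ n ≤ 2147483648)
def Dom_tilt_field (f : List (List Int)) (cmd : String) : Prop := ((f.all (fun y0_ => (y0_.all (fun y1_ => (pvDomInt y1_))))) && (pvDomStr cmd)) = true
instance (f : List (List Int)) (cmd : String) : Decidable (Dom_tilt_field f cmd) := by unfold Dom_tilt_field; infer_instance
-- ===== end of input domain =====

-- B re-implements the tilt by gathering each line as a list of (y,x) coordinates (the tilt
-- direction is encoded in coordinate order) and sliding it with one recursive lookahead pass,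
-- instead of A's getnums/sert grid surgery with staged remove/merge/pad while-loops; objective: alternative.


-- ===== PORT A =====
-- getnums(f, r, c): indices are always in range under Pre_, so plain getD is exact there.
def getnums (f : List (List Int)) (r c : List Nat) : List Int :=
  r.foldl (fun ints y => c.foldl (fun ints x => ints ++ [(f.getD y []).getD x 0]) ints) []

-- sert(f, liste, r, c, reverse): the double loop threading (f, liste); liste.pop(0)/pop(-1)
-- modelled by head/tail resp. getLast/dropLast (the pop is never on an empty list under Pre_).
def sert (f : List (List Int)) (liste : List Int) (r c : List Nat) (reverse : Bool) : List (List Int) :=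
  ((List.range 4).foldl (fun (st : List (List Int) × List Int) y =>
    (List.range 4).foldl (fun st x =>
      if y ∈ r ∧ x ∈ c then
        (st.1.set y ((st.1.getD y []).set x
            (if reverse then st.2.getLast?.getD 0 else st.2.headD 0)),
         if reverse then st.2.dropLast else st.2.tail)
      else st) st)
   (f, liste)).1

def get_new_field : List (List Int) :=
  (List.range 4).foldl (fun f _ => f ++ [(List.range 4).foldl (fun r _ => r ++ [(0:Int)]) []]) []

-- `while 0 in liste: liste.remove(0)` (the loop runs at most len(liste) times: fuel)
def removeAllZerosGo : Nat → List Int → List Int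
  | 0, l => l
  | fuel+1, l =>
    if (0:Int) ∈ l then removeAllZerosGo fuel ((PySem.List.remove? l 0).getD []) else l

def removeAllZeros (l : List Int) : List Int := removeAllZerosGo l.length l

-- `while i < len(liste)-1: if liste[i]==liste[i+1]: liste[i]*=2; i+=1`
-- (runs at most len(liste)-i times: fuel; liste[i], liste[i+1] are in range at use, so getD is exact)
def mergeGo : Nat → List Int → Nat → List Int
  | 0, l, _ => l
  | fuel+1, l, i =>
    if i < l.length - 1 then
      mergeGo fuel (if l.getD i 0 = l.getD (i+1) 0 then l.set i (2 * l.getD i 0) else l) (i+1)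
    else l

def mergeLoop (l : List Int) (i : Nat) : List Int := mergeGo (l.length - i) l i

-- the body of A's `for n in range(4)` loop; `[::-1]` is List.reverse (PySem.List.slice?_none_none_neg_one)
def tiltStep (f : List (List Int)) (cmd : String) (f2 : List (List Int)) (n : Nat) : List (List Int) :=
  let liste :=
    if cmd = "w" then getnums f [0,1,2,3] [n]
    else if cmd = "a" then getnums f [n] [0,1,2,3]
    else if cmd = "s" then (getnums f [0,1,2,3] [n]).reverse
    else if cmd = "d" then (getnums f [n] [0,1,2,3]).reverse
    else []  -- liste is unbound in Python here (UnboundLocalError); excluded by Pre_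
  let start_len := liste.length
  let liste2 := mergeLoop (removeAllZeros liste) 0
  let liste3 := liste2 ++ List.replicate (start_len - liste2.length) 0
  if cmd = "w" then sert f2 liste3 [0,1,2,3] [n] false
  else if cmd = "a" then sert f2 liste3 [n] [0,1,2,3] false
  else if cmd = "s" then sert f2 liste3 [0,1,2,3] [n] true
  else if cmd = "d" then sert f2 liste3 [n] [0,1,2,3] true
  else f2

def tilt_field (f : List (List Int)) (cmd : String) : List (List Int) :=
  (List.range 4).foldl (tiltStep f cmd) get_new_field

-- ===== PORT B =====
-- slide(rest, zeros): one recursive pass; `next((w for w in rest if w != 0), None)` is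
-- rest.find? (exact: Python compares an int v with None as unequal, i.e. the some case only).
def slide : List Int → Nat → List Int
  | [], zeros => List.replicate zeros 0
  | v :: rest, zeros =>
    if v = 0 then slide rest (zeros + 1)
    else (if rest.find? (fun w => w != 0) = some v then 2 * v else v) :: slide rest zeros

-- line_coords(k): the line's coordinates in tilt order; reversed(range(4)) = [3,2,1,0]
def line_coords (cmd : String) (k : Nat) : List (Nat × Nat) :=
  if cmd = "a" then (List.range 4).map (fun x => (k, x))
  else if cmd = "d" then (List.range 4).reverse.map (fun x => (k, x))
  else if cmd = "w" then (List.range 4).map (fun y => (y, k))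
  else if cmd = "s" then (List.range 4).reverse.map (fun y => (y, k))
  else []  -- Source B returns None here and the caller then raises, like A; excluded by Pre_

-- `for (y, x), v in zip(coords, vals): out[y][x] = v`
def scatter (out : List (List Int)) (coords : List (Nat × Nat)) (vals : List Int) : List (List Int) :=
  (coords.zip vals).foldl (fun o cv => o.set cv.1.1 ((o.getD cv.1.1 []).set cv.1.2 cv.2)) out

-- body of Source B's `for k in range(4)` loop; f[y][x] via getD (in range under Pre_, so exact)
def altStep (f : List (List Int)) (cmd : String) (out : List (List Int)) (k : Nat) : List (List Int) :=
  let coords := line_coords cmd k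
  let vals := slide (coords.map (fun yx => (f.getD yx.1 []).getD yx.2 0)) 0
  scatter out coords vals

def tilt_field_alt (f : List (List Int)) (cmd : String) : List (List Int) :=
  (List.range 4).foldl (altStep f cmd) (List.replicate 4 (List.replicate 4 0))

-- ===== PRECONDITION & SPEC =====
-- Pre_: the natural 2048 domain — a board with at least four rows of at least four cells
-- (A reads exactly the top-left 4×4) and a valid command; on other inputs A raises
-- (IndexError, or UnboundLocalError for an unknown cmd).
def Pre_tilt_field (f : List (List Int)) (cmd : String) : Prop :=
  (cmd = "w" ∨ cmd = "a" ∨ cmd = "s" ∨ cmd = "d") ∧ 4 ≤ f.length ∧ ∀ row ∈ f.take 4, 4 ≤ row.length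
instance (f : List (List Int)) (cmd : String) : Decidable (Pre_tilt_field f cmd) := by unfold Pre_tilt_field; infer_instance

def pvWitness_tilt_field : List (List Int) × String :=
  ([[2,0,2,0],[0,0,0,0],[2,2,4,4],[0,8,8,2]], "a")

def Spec_tilt_field (f : List (List Int)) (cmd : String) (out : List (List Int)) : Prop := out = tilt_field_alt f cmd
instance (f : List (List Int)) (cmd : String) (out : List (List Int)) : Decidable (Spec_tilt_field f cmd out) := by unfold Spec_tilt_field; infer_instance

-- ===== CLAIM (what is proved, stated in full; the proofs are below) =====
def Claim_equal_tilt_field : Prop := ∀ (f : List (List Int)) (cmd : String), Dom_tilt_field f cmd → Pre_tilt_field f cmd → Spec_tilt_field f cmd (tilt_field f cmd)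

-- ===== LEMMAS AND PROOFS =====

theorem filter_erase_zero (l : List Int) (h : (0:Int) ∈ l) :
    (l.erase 0).filter (fun x => x != 0) = l.filter (fun x => x != 0) := by
  induction l with
  | nil => simp at h
  | cons x xs ih =>
    by_cases hx : x = 0
    · subst hx; simp [List.erase_cons]
    · have hx' : (0:Int) ∈ xs := by
        rcases List.mem_cons.mp h with h1 | h1
        · exact absurd h1.symm hx
        · exact h1
      have : ((x : Int) == 0) = false := by simpa using hx
      simp [List.erase_cons, this, List.filter_cons, ih hx']

theorem removeAllZerosGo_eq (fuel : Nat) (l : List Int) (h : l.length ≤ fuel) :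
    removeAllZerosGo fuel l = l.filter (fun x => x != 0) := by
  induction fuel generalizing l with
  | zero =>
    have : l = [] := List.eq_nil_of_length_eq_zero (by omega)
    subst this
    rfl
  | succ n ih =>
    rw [removeAllZerosGo]
    by_cases h0 : (0:Int) ∈ l
    · rw [if_pos h0, PySem.List.remove?_eq_some_erase l 0 h0]
      simp only [Option.getD_some]
      have hlen := List.length_erase_of_mem h0
      have hpos := List.length_pos_of_mem h0
      rw [ih (l.erase 0) (by omega), filter_erase_zero l h0]
    · rw [if_neg h0]
      symm
      rw [List.filter_eq_self]
      intro a ha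
      have : a ≠ 0 := by rintro rfl; exact h0 ha
      simpa using this

theorem removeAllZeros_eq_filter (l : List Int) :
    removeAllZeros l = l.filter (fun x => x != 0) :=
  removeAllZerosGo_eq l.length l le_rfl

def partialMerge (v : List Int) (k : Nat) : List Int :=
  (List.range v.length).map (fun j =>
    if j < k ∧ j + 1 < v.length ∧ v.getD j 0 = v.getD (j+1) 0 then 2 * v.getD j 0 else v.getD j 0)

theorem partialMerge_length (v : List Int) (k : Nat) : (partialMerge v k).length = v.length := by
  simp [partialMerge]

theorem partialMerge_zero (v : List Int) : partialMerge v 0 = v := by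
  apply List.ext_getElem
  · simp [partialMerge]
  · intro j h1 h2
    simp [partialMerge, List.getD_eq_getElem?_getD, List.getElem?_eq_getElem h2]

theorem getD_partialMerge_ge (v : List Int) (k j : Nat) (hj : k ≤ j) :
    (partialMerge v k).getD j 0 = v.getD j 0 := by
  by_cases h : j < v.length
  · rw [List.getD_eq_getElem _ _ (by simpa [partialMerge_length] using h),
        List.getD_eq_getElem _ _ h]
    simp only [partialMerge, List.getElem_map, List.getElem_range]
    rw [if_neg (by omega), List.getD_eq_getElem _ _ h]
  · rw [List.getD_eq_default _ _ (by simpa [partialMerge_length] using h),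
        List.getD_eq_default _ _ (by omega)]

theorem partialMerge_congr (v : List Int) (k1 k2 : Nat)
    (h : ∀ j, j + 1 < v.length → v.getD j 0 = v.getD (j+1) 0 → (j < k1 ↔ j < k2)) :
    partialMerge v k1 = partialMerge v k2 := by
  apply List.ext_getElem
  · simp [partialMerge_length]
  · intro j h1 h2
    simp only [partialMerge_length] at h1
    simp only [partialMerge, List.getElem_map, List.getElem_range]
    by_cases hc : j + 1 < v.length ∧ v.getD j 0 = v.getD (j+1) 0
    · have := h j hc.1 hc.2
      by_cases hk : j < k1
      · rw [if_pos ⟨hk, hc⟩, if_pos ⟨this.mp hk, hc⟩]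
      · rw [if_neg (by tauto), if_neg (by have := this.not; tauto)]
    · rw [if_neg (by tauto), if_neg (by tauto)]

theorem set_partialMerge (v : List Int) (k : Nat) (hk : k + 1 < v.length)
    (he : v.getD k 0 = v.getD (k+1) 0) :
    (partialMerge v k).set k (2 * v.getD k 0) = partialMerge v (k+1) := by
  apply List.ext_getElem
  · simp [partialMerge_length]
  · intro j h1 h2
    simp only [partialMerge_length, List.length_set] at h1
    by_cases hj : j = k
    · subst hj
      rw [List.getElem_set_self (by simpa [partialMerge_length] using h1)]
      simp only [partialMerge, List.getElem_map, List.getElem_range]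
      rw [if_pos ⟨by omega, hk, he⟩]
    · rw [List.getElem_set_ne (by omega)]
      simp only [partialMerge, List.getElem_map, List.getElem_range]
      by_cases hc : j + 1 < v.length ∧ v.getD j 0 = v.getD (j+1) 0
      · by_cases hjk : j < k
        · rw [if_pos ⟨hjk, hc⟩, if_pos ⟨by omega, hc⟩]
        · rw [if_neg (by tauto), if_neg (by push_neg; intro h'; omega)]
      · rw [if_neg (by tauto), if_neg (by tauto)]

theorem mergeGo_partial (v : List Int) (fuel k : Nat) (h : v.length - k ≤ fuel) :
    mergeGo fuel (partialMerge v k) k = partialMerge v v.length := by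
  induction fuel generalizing k with
  | zero =>
    rw [mergeGo]
    exact partialMerge_congr v k v.length (by intro j hj _; omega)
  | succ n ih =>
    rw [mergeGo]
    by_cases hk : k < (partialMerge v k).length - 1
    · rw [if_pos hk]
      rw [partialMerge_length] at hk
      rw [getD_partialMerge_ge v k k le_rfl, getD_partialMerge_ge v k (k+1) (by omega)]
      by_cases he : v.getD k 0 = v.getD (k+1) 0
      · rw [if_pos he, set_partialMerge v k (by omega) he]
        exact ih (k+1) (by omega)
      · rw [if_neg he]
        have heq : partialMerge v k = partialMerge v (k+1) :=
          partialMerge_congr v k (k+1) (by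
            intro j hj hvj
            by_cases hjk : j = k
            · subst hjk; exact absurd hvj he
            · omega)
        rw [heq]
        exact ih (k+1) (by omega)
    · rw [if_neg hk]
      rw [partialMerge_length] at hk
      exact partialMerge_congr v k v.length (by intro j hj _; omega)

theorem mergeLoop_eq (v : List Int) : mergeLoop v 0 = partialMerge v v.length := by
  have h1 : mergeLoop v 0 = mergeGo (v.length - 0) (partialMerge v 0) 0 := by
    rw [mergeLoop, partialMerge_zero]
  rw [h1]
  exact mergeGo_partial v (v.length - 0) 0 (by omega)

-- B-side: peel the fully-merged list at a nonzero head
theorem partialMerge_cons_full (v : Int) (w : List Int) :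
    partialMerge (v::w) (w.length+1)
      = (if w.head? = some v then 2 * v else v) :: partialMerge w w.length := by
  apply List.ext_getElem
  · simp [partialMerge_length]
  · intro j h1 h2
    simp only [partialMerge_length, List.length_cons] at h1
    match j with
    | 0 =>
      simp only [partialMerge, List.length_cons, List.getElem_map, List.getElem_range,
        List.getElem_cons_zero]
      cases w with
      | nil => simp
      | cons h t =>
        have hh : ((h::t).head? = some v) ↔ (v = h) := by
          simp [eq_comm]
        by_cases hv : v = h
        · rw [if_pos ⟨by omega, by simp, by simp [List.getD, hv]⟩, if_pos (hh.mpr hv)]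
          simp [List.getD]
        · rw [if_neg (by
              rintro ⟨-, -, hc⟩
              simp only [List.getD_cons_succ, List.getD_cons_zero] at hc
              exact hv hc),
            if_neg (fun hx => hv (hh.mp hx))]
          simp only [List.getD_cons_zero]
    | j+1 =>
      have hj : j < w.length := by omega
      simp only [partialMerge, List.length_cons, List.getElem_map, List.getElem_range,
        List.getElem_cons_succ]
      rw [if_congr (show (j+1 < w.length+1 ∧ j+1+1 < w.length+1 ∧
            (v::w).getD (j+1) 0 = (v::w).getD (j+1+1) 0)
          ↔ (j < w.length ∧ j+1 < w.length ∧ w.getD j 0 = w.getD (j+1) 0) by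
        simp only [List.getD_cons_succ]
        constructor
        · rintro ⟨a, b, c⟩; exact ⟨by omega, by omega, c⟩
        · rintro ⟨a, b, c⟩; exact ⟨by omega, by omega, c⟩) rfl rfl]
      simp only [List.getD_cons_succ]

theorem slide_spec (rest : List Int) (zeros : Nat) :
    slide rest zeros
      = partialMerge (rest.filter (fun x => x != 0)) (rest.filter (fun x => x != 0)).length
        ++ List.replicate (zeros + (rest.length - (rest.filter (fun x => x != 0)).length)) 0 := by
  induction rest generalizing zeros with
  | nil => simp [slide, partialMerge]
  | cons v rest ih =>
    rw [slide]
    by_cases hv : v = 0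
    · rw [if_pos hv, ih]
      have hm := List.length_filter_le (fun x => x != 0) rest
      have hf : (v :: rest).filter (fun x => x != 0) = rest.filter (fun x => x != 0) := by
        simp [List.filter_cons, hv]
      rw [hf]
      congr 1
      have : zeros + 1 + (rest.length - (rest.filter (fun x => x != 0)).length)
           = zeros + ((v :: rest).length - (rest.filter (fun x => x != 0)).length) := by
        simp only [List.length_cons]; omega
      rw [this]
    · rw [if_neg hv]
      have hm := List.length_filter_le (fun x => x != 0) rest
      have hf : (v :: rest).filter (fun x => x != 0) = v :: rest.filter (fun x => x != 0) := by
        simp [List.filter_cons, hv]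
      rw [hf]
      simp only [List.length_cons]
      rw [partialMerge_cons_full, ih, List.head?_filter]
      rw [show zeros + (rest.length + 1 - ((rest.filter (fun x => x != 0)).length + 1))
            = zeros + (rest.length - (rest.filter (fun x => x != 0)).length) by omega]
      rfl

theorem slide_length (l : List Int) : (slide l 0).length = l.length := by
  rw [slide_spec]
  have := List.length_filter_le (fun x => x != 0) l
  simp only [List.length_append, partialMerge_length, List.length_replicate]
  omega

-- A's remove/merge/pad pipeline computes exactly B's slide
theorem pipeline_eq (l : List Int) :
    mergeLoop (removeAllZeros l) 0 ++
      List.replicate (l.length - (mergeLoop (removeAllZeros l) 0).length) 0 = slide l 0 := by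
  rw [removeAllZeros_eq_filter, mergeLoop_eq, partialMerge_length, slide_spec]
  simp

theorem tiltStep_slide (f : List (List Int)) (cmd : String) (f2 : List (List Int)) (n : Nat) :
    tiltStep f cmd f2 n =
      (if cmd = "w" then sert f2 (slide (getnums f [0,1,2,3] [n]) 0) [0,1,2,3] [n] false
       else if cmd = "a" then sert f2 (slide (getnums f [n] [0,1,2,3]) 0) [n] [0,1,2,3] false
       else if cmd = "s" then sert f2 (slide ((getnums f [0,1,2,3] [n]).reverse) 0) [0,1,2,3] [n] true
       else if cmd = "d" then sert f2 (slide ((getnums f [n] [0,1,2,3]).reverse) 0) [n] [0,1,2,3] true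
       else f2) := by
  simp only [tiltStep]
  rw [pipeline_eq]
  split_ifs <;> rfl

theorem exists_four {α : Type} (l : List α) (h : 4 ≤ l.length) :
    ∃ a b c d t, l = a :: b :: c :: d :: t := by
  match l with
  | a :: b :: c :: d :: t => exact ⟨a, b, c, d, t, rfl⟩
  | [] | [_] | [_,_] | [_,_,_] => simp at h

theorem exists_four_of_len {α : Type} (l : List α) (h : l.length = 4) :
    ∃ a b c d, l = [a, b, c, d] := by
  match l with
  | [a, b, c, d] => exact ⟨a, b, c, d, rfl⟩

theorem getnums_row0 (a b c d : Int) (t : List Int) (x1 : List Int) (x2 : List Int) (x3 : List Int) (tf : List (List Int)) :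
    getnums ((a::b::c::d::t)::x1::x2::x3::tf) [0] [0,1,2,3] = [a,b,c,d] := by rfl

theorem getnums_row1 (a b c d : Int) (t : List Int) (x0 : List Int) (x2 : List Int) (x3 : List Int) (tf : List (List Int)) :
    getnums (x0::(a::b::c::d::t)::x2::x3::tf) [1] [0,1,2,3] = [a,b,c,d] := by rfl

theorem getnums_row2 (a b c d : Int) (t : List Int) (x0 : List Int) (x1 : List Int) (x3 : List Int) (tf : List (List Int)) :
    getnums (x0::x1::(a::b::c::d::t)::x3::tf) [2] [0,1,2,3] = [a,b,c,d] := by rfl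

theorem getnums_row3 (a b c d : Int) (t : List Int) (x0 : List Int) (x1 : List Int) (x2 : List Int) (tf : List (List Int)) :
    getnums (x0::x1::x2::(a::b::c::d::t)::tf) [3] [0,1,2,3] = [a,b,c,d] := by rfl

theorem getnums_col0 (a0 b0 c0 d0 a1 b1 c1 d1 a2 b2 c2 d2 a3 b3 c3 d3 : Int) (t0 t1 t2 t3 : List Int) (tf : List (List Int)) :
    getnums ((a0::b0::c0::d0::t0)::(a1::b1::c1::d1::t1)::(a2::b2::c2::d2::t2)::(a3::b3::c3::d3::t3)::tf) [0,1,2,3] [0] = [a0,a1,a2,a3] := by rfl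

theorem getnums_col1 (a0 b0 c0 d0 a1 b1 c1 d1 a2 b2 c2 d2 a3 b3 c3 d3 : Int) (t0 t1 t2 t3 : List Int) (tf : List (List Int)) :
    getnums ((a0::b0::c0::d0::t0)::(a1::b1::c1::d1::t1)::(a2::b2::c2::d2::t2)::(a3::b3::c3::d3::t3)::tf) [0,1,2,3] [1] = [b0,b1,b2,b3] := by rfl

theorem getnums_col2 (a0 b0 c0 d0 a1 b1 c1 d1 a2 b2 c2 d2 a3 b3 c3 d3 : Int) (t0 t1 t2 t3 : List Int) (tf : List (List Int)) :
    getnums ((a0::b0::c0::d0::t0)::(a1::b1::c1::d1::t1)::(a2::b2::c2::d2::t2)::(a3::b3::c3::d3::t3)::tf) [0,1,2,3] [2] = [c0,c1,c2,c3] := by rfl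

theorem getnums_col3 (a0 b0 c0 d0 a1 b1 c1 d1 a2 b2 c2 d2 a3 b3 c3 d3 : Int) (t0 t1 t2 t3 : List Int) (tf : List (List Int)) :
    getnums ((a0::b0::c0::d0::t0)::(a1::b1::c1::d1::t1)::(a2::b2::c2::d2::t2)::(a3::b3::c3::d3::t3)::tf) [0,1,2,3] [3] = [d0,d1,d2,d3] := by rfl

theorem rev4 (a b c d : Int) : [a,b,c,d].reverse = [d,c,b,a] := by rfl

theorem get_new_field_eq : get_new_field = [[0,0,0,0],[0,0,0,0],[0,0,0,0],[0,0,0,0]] := by rfl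

-- line_coords on each literal command
theorem coords_a (k : Nat) : line_coords "a" k = [(k,0),(k,1),(k,2),(k,3)] := by rfl
theorem coords_d (k : Nat) : line_coords "d" k = [(k,3),(k,2),(k,1),(k,0)] := by rfl
theorem coords_w (k : Nat) : line_coords "w" k = [(0,k),(1,k),(2,k),(3,k)] := by rfl
theorem coords_s (k : Nat) : line_coords "s" k = [(3,k),(2,k),(1,k),(0,k)] := by rfl

theorem cell00 (a0 b0 c0 d0 a1 b1 c1 d1 a2 b2 c2 d2 a3 b3 c3 d3 : Int) (t0 t1 t2 t3 : List Int) (tf : List (List Int)) :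
    ((((a0::b0::c0::d0::t0)::(a1::b1::c1::d1::t1)::(a2::b2::c2::d2::t2)::(a3::b3::c3::d3::t3)::tf : List (List Int))).getD 0 []).getD 0 0 = a0 := by rfl

theorem cell01 (a0 b0 c0 d0 a1 b1 c1 d1 a2 b2 c2 d2 a3 b3 c3 d3 : Int) (t0 t1 t2 t3 : List Int) (tf : List (List Int)) :
    ((((a0::b0::c0::d0::t0)::(a1::b1::c1::d1::t1)::(a2::b2::c2::d2::t2)::(a3::b3::c3::d3::t3)::tf : List (List Int))).getD 0 []).getD 1 0 = b0 := by rfl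

theorem cell02 (a0 b0 c0 d0 a1 b1 c1 d1 a2 b2 c2 d2 a3 b3 c3 d3 : Int) (t0 t1 t2 t3 : List Int) (tf : List (List Int)) :
    ((((a0::b0::c0::d0::t0)::(a1::b1::c1::d1::t1)::(a2::b2::c2::d2::t2)::(a3::b3::c3::d3::t3)::tf : List (List Int))).getD 0 []).getD 2 0 = c0 := by rfl

theorem cell03 (a0 b0 c0 d0 a1 b1 c1 d1 a2 b2 c2 d2 a3 b3 c3 d3 : Int) (t0 t1 t2 t3 : List Int) (tf : List (List Int)) :
    ((((a0::b0::c0::d0::t0)::(a1::b1::c1::d1::t1)::(a2::b2::c2::d2::t2)::(a3::b3::c3::d3::t3)::tf : List (List Int))).getD 0 []).getD 3 0 = d0 := by rfl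

theorem cell10 (a0 b0 c0 d0 a1 b1 c1 d1 a2 b2 c2 d2 a3 b3 c3 d3 : Int) (t0 t1 t2 t3 : List Int) (tf : List (List Int)) :
    ((((a0::b0::c0::d0::t0)::(a1::b1::c1::d1::t1)::(a2::b2::c2::d2::t2)::(a3::b3::c3::d3::t3)::tf : List (List Int))).getD 1 []).getD 0 0 = a1 := by rfl

theorem cell11 (a0 b0 c0 d0 a1 b1 c1 d1 a2 b2 c2 d2 a3 b3 c3 d3 : Int) (t0 t1 t2 t3 : List Int) (tf : List (List Int)) :
    ((((a0::b0::c0::d0::t0)::(a1::b1::c1::d1::t1)::(a2::b2::c2::d2::t2)::(a3::b3::c3::d3::t3)::tf : List (List Int))).getD 1 []).getD 1 0 = b1 := by rfl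

theorem cell12 (a0 b0 c0 d0 a1 b1 c1 d1 a2 b2 c2 d2 a3 b3 c3 d3 : Int) (t0 t1 t2 t3 : List Int) (tf : List (List Int)) :
    ((((a0::b0::c0::d0::t0)::(a1::b1::c1::d1::t1)::(a2::b2::c2::d2::t2)::(a3::b3::c3::d3::t3)::tf : List (List Int))).getD 1 []).getD 2 0 = c1 := by rfl

theorem cell13 (a0 b0 c0 d0 a1 b1 c1 d1 a2 b2 c2 d2 a3 b3 c3 d3 : Int) (t0 t1 t2 t3 : List Int) (tf : List (List Int)) :
    ((((a0::b0::c0::d0::t0)::(a1::b1::c1::d1::t1)::(a2::b2::c2::d2::t2)::(a3::b3::c3::d3::t3)::tf : List (List Int))).getD 1 []).getD 3 0 = d1 := by rfl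

theorem cell20 (a0 b0 c0 d0 a1 b1 c1 d1 a2 b2 c2 d2 a3 b3 c3 d3 : Int) (t0 t1 t2 t3 : List Int) (tf : List (List Int)) :
    ((((a0::b0::c0::d0::t0)::(a1::b1::c1::d1::t1)::(a2::b2::c2::d2::t2)::(a3::b3::c3::d3::t3)::tf : List (List Int))).getD 2 []).getD 0 0 = a2 := by rfl

theorem cell21 (a0 b0 c0 d0 a1 b1 c1 d1 a2 b2 c2 d2 a3 b3 c3 d3 : Int) (t0 t1 t2 t3 : List Int) (tf : List (List Int)) :
    ((((a0::b0::c0::d0::t0)::(a1::b1::c1::d1::t1)::(a2::b2::c2::d2::t2)::(a3::b3::c3::d3::t3)::tf : List (List Int))).getD 2 []).getD 1 0 = b2 := by rfl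

theorem cell22 (a0 b0 c0 d0 a1 b1 c1 d1 a2 b2 c2 d2 a3 b3 c3 d3 : Int) (t0 t1 t2 t3 : List Int) (tf : List (List Int)) :
    ((((a0::b0::c0::d0::t0)::(a1::b1::c1::d1::t1)::(a2::b2::c2::d2::t2)::(a3::b3::c3::d3::t3)::tf : List (List Int))).getD 2 []).getD 2 0 = c2 := by rfl

theorem cell23 (a0 b0 c0 d0 a1 b1 c1 d1 a2 b2 c2 d2 a3 b3 c3 d3 : Int) (t0 t1 t2 t3 : List Int) (tf : List (List Int)) :
    ((((a0::b0::c0::d0::t0)::(a1::b1::c1::d1::t1)::(a2::b2::c2::d2::t2)::(a3::b3::c3::d3::t3)::tf : List (List Int))).getD 2 []).getD 3 0 = d2 := by rfl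

theorem cell30 (a0 b0 c0 d0 a1 b1 c1 d1 a2 b2 c2 d2 a3 b3 c3 d3 : Int) (t0 t1 t2 t3 : List Int) (tf : List (List Int)) :
    ((((a0::b0::c0::d0::t0)::(a1::b1::c1::d1::t1)::(a2::b2::c2::d2::t2)::(a3::b3::c3::d3::t3)::tf : List (List Int))).getD 3 []).getD 0 0 = a3 := by rfl

theorem cell31 (a0 b0 c0 d0 a1 b1 c1 d1 a2 b2 c2 d2 a3 b3 c3 d3 : Int) (t0 t1 t2 t3 : List Int) (tf : List (List Int)) :
    ((((a0::b0::c0::d0::t0)::(a1::b1::c1::d1::t1)::(a2::b2::c2::d2::t2)::(a3::b3::c3::d3::t3)::tf : List (List Int))).getD 3 []).getD 1 0 = b3 := by rfl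

theorem cell32 (a0 b0 c0 d0 a1 b1 c1 d1 a2 b2 c2 d2 a3 b3 c3 d3 : Int) (t0 t1 t2 t3 : List Int) (tf : List (List Int)) :
    ((((a0::b0::c0::d0::t0)::(a1::b1::c1::d1::t1)::(a2::b2::c2::d2::t2)::(a3::b3::c3::d3::t3)::tf : List (List Int))).getD 3 []).getD 2 0 = c3 := by rfl

theorem cell33 (a0 b0 c0 d0 a1 b1 c1 d1 a2 b2 c2 d2 a3 b3 c3 d3 : Int) (t0 t1 t2 t3 : List Int) (tf : List (List Int)) :
    ((((a0::b0::c0::d0::t0)::(a1::b1::c1::d1::t1)::(a2::b2::c2::d2::t2)::(a3::b3::c3::d3::t3)::tf : List (List Int))).getD 3 []).getD 3 0 = d3 := by rfl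

theorem sert_row0_false (g00 g01 g02 g03 g10 g11 g12 g13 g20 g21 g22 g23 g30 g31 g32 g33 p q r s : Int) :
    sert [[g00,g01,g02,g03],[g10,g11,g12,g13],[g20,g21,g22,g23],[g30,g31,g32,g33]] [p,q,r,s] [0] [0,1,2,3] false = [[p,q,r,s],[g10,g11,g12,g13],[g20,g21,g22,g23],[g30,g31,g32,g33]] := by rfl

theorem sert_row0_true (g00 g01 g02 g03 g10 g11 g12 g13 g20 g21 g22 g23 g30 g31 g32 g33 p q r s : Int) :
    sert [[g00,g01,g02,g03],[g10,g11,g12,g13],[g20,g21,g22,g23],[g30,g31,g32,g33]] [p,q,r,s] [0] [0,1,2,3] true = [[s,r,q,p],[g10,g11,g12,g13],[g20,g21,g22,g23],[g30,g31,g32,g33]] := by rfl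

theorem sert_col0_false (g00 g01 g02 g03 g10 g11 g12 g13 g20 g21 g22 g23 g30 g31 g32 g33 p q r s : Int) :
    sert [[g00,g01,g02,g03],[g10,g11,g12,g13],[g20,g21,g22,g23],[g30,g31,g32,g33]] [p,q,r,s] [0,1,2,3] [0] false = [[p,g01,g02,g03],[q,g11,g12,g13],[r,g21,g22,g23],[s,g31,g32,g33]] := by rfl

theorem sert_col0_true (g00 g01 g02 g03 g10 g11 g12 g13 g20 g21 g22 g23 g30 g31 g32 g33 p q r s : Int) :
    sert [[g00,g01,g02,g03],[g10,g11,g12,g13],[g20,g21,g22,g23],[g30,g31,g32,g33]] [p,q,r,s] [0,1,2,3] [0] true = [[s,g01,g02,g03],[r,g11,g12,g13],[q,g21,g22,g23],[p,g31,g32,g33]] := by rfl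

theorem sert_row1_false (g00 g01 g02 g03 g10 g11 g12 g13 g20 g21 g22 g23 g30 g31 g32 g33 p q r s : Int) :
    sert [[g00,g01,g02,g03],[g10,g11,g12,g13],[g20,g21,g22,g23],[g30,g31,g32,g33]] [p,q,r,s] [1] [0,1,2,3] false = [[g00,g01,g02,g03],[p,q,r,s],[g20,g21,g22,g23],[g30,g31,g32,g33]] := by rfl

theorem sert_row1_true (g00 g01 g02 g03 g10 g11 g12 g13 g20 g21 g22 g23 g30 g31 g32 g33 p q r s : Int) :
    sert [[g00,g01,g02,g03],[g10,g11,g12,g13],[g20,g21,g22,g23],[g30,g31,g32,g33]] [p,q,r,s] [1] [0,1,2,3] true = [[g00,g01,g02,g03],[s,r,q,p],[g20,g21,g22,g23],[g30,g31,g32,g33]] := by rfl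

theorem sert_col1_false (g00 g01 g02 g03 g10 g11 g12 g13 g20 g21 g22 g23 g30 g31 g32 g33 p q r s : Int) :
    sert [[g00,g01,g02,g03],[g10,g11,g12,g13],[g20,g21,g22,g23],[g30,g31,g32,g33]] [p,q,r,s] [0,1,2,3] [1] false = [[g00,p,g02,g03],[g10,q,g12,g13],[g20,r,g22,g23],[g30,s,g32,g33]] := by rfl

theorem sert_col1_true (g00 g01 g02 g03 g10 g11 g12 g13 g20 g21 g22 g23 g30 g31 g32 g33 p q r s : Int) :
    sert [[g00,g01,g02,g03],[g10,g11,g12,g13],[g20,g21,g22,g23],[g30,g31,g32,g33]] [p,q,r,s] [0,1,2,3] [1] true = [[g00,s,g02,g03],[g10,r,g12,g13],[g20,q,g22,g23],[g30,p,g32,g33]] := by rfl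

theorem sert_row2_false (g00 g01 g02 g03 g10 g11 g12 g13 g20 g21 g22 g23 g30 g31 g32 g33 p q r s : Int) :
    sert [[g00,g01,g02,g03],[g10,g11,g12,g13],[g20,g21,g22,g23],[g30,g31,g32,g33]] [p,q,r,s] [2] [0,1,2,3] false = [[g00,g01,g02,g03],[g10,g11,g12,g13],[p,q,r,s],[g30,g31,g32,g33]] := by rfl

theorem sert_row2_true (g00 g01 g02 g03 g10 g11 g12 g13 g20 g21 g22 g23 g30 g31 g32 g33 p q r s : Int) :
    sert [[g00,g01,g02,g03],[g10,g11,g12,g13],[g20,g21,g22,g23],[g30,g31,g32,g33]] [p,q,r,s] [2] [0,1,2,3] true = [[g00,g01,g02,g03],[g10,g11,g12,g13],[s,r,q,p],[g30,g31,g32,g33]] := by rfl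

theorem sert_col2_false (g00 g01 g02 g03 g10 g11 g12 g13 g20 g21 g22 g23 g30 g31 g32 g33 p q r s : Int) :
    sert [[g00,g01,g02,g03],[g10,g11,g12,g13],[g20,g21,g22,g23],[g30,g31,g32,g33]] [p,q,r,s] [0,1,2,3] [2] false = [[g00,g01,p,g03],[g10,g11,q,g13],[g20,g21,r,g23],[g30,g31,s,g33]] := by rfl

theorem sert_col2_true (g00 g01 g02 g03 g10 g11 g12 g13 g20 g21 g22 g23 g30 g31 g32 g33 p q r s : Int) :
    sert [[g00,g01,g02,g03],[g10,g11,g12,g13],[g20,g21,g22,g23],[g30,g31,g32,g33]] [p,q,r,s] [0,1,2,3] [2] true = [[g00,g01,s,g03],[g10,g11,r,g13],[g20,g21,q,g23],[g30,g31,p,g33]] := by rfl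

theorem sert_row3_false (g00 g01 g02 g03 g10 g11 g12 g13 g20 g21 g22 g23 g30 g31 g32 g33 p q r s : Int) :
    sert [[g00,g01,g02,g03],[g10,g11,g12,g13],[g20,g21,g22,g23],[g30,g31,g32,g33]] [p,q,r,s] [3] [0,1,2,3] false = [[g00,g01,g02,g03],[g10,g11,g12,g13],[g20,g21,g22,g23],[p,q,r,s]] := by rfl

theorem sert_row3_true (g00 g01 g02 g03 g10 g11 g12 g13 g20 g21 g22 g23 g30 g31 g32 g33 p q r s : Int) :
    sert [[g00,g01,g02,g03],[g10,g11,g12,g13],[g20,g21,g22,g23],[g30,g31,g32,g33]] [p,q,r,s] [3] [0,1,2,3] true = [[g00,g01,g02,g03],[g10,g11,g12,g13],[g20,g21,g22,g23],[s,r,q,p]] := by rfl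

theorem sert_col3_false (g00 g01 g02 g03 g10 g11 g12 g13 g20 g21 g22 g23 g30 g31 g32 g33 p q r s : Int) :
    sert [[g00,g01,g02,g03],[g10,g11,g12,g13],[g20,g21,g22,g23],[g30,g31,g32,g33]] [p,q,r,s] [0,1,2,3] [3] false = [[g00,g01,g02,p],[g10,g11,g12,q],[g20,g21,g22,r],[g30,g31,g32,s]] := by rfl

theorem sert_col3_true (g00 g01 g02 g03 g10 g11 g12 g13 g20 g21 g22 g23 g30 g31 g32 g33 p q r s : Int) :
    sert [[g00,g01,g02,g03],[g10,g11,g12,g13],[g20,g21,g22,g23],[g30,g31,g32,g33]] [p,q,r,s] [0,1,2,3] [3] true = [[g00,g01,g02,s],[g10,g11,g12,r],[g20,g21,g22,q],[g30,g31,g32,p]] := by rfl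

theorem scatter_a0 (g00 g01 g02 g03 g10 g11 g12 g13 g20 g21 g22 g23 g30 g31 g32 g33 p q r s : Int) :
    scatter [[g00,g01,g02,g03],[g10,g11,g12,g13],[g20,g21,g22,g23],[g30,g31,g32,g33]] [(0,0),(0,1),(0,2),(0,3)] [p,q,r,s] = [[p,q,r,s],[g10,g11,g12,g13],[g20,g21,g22,g23],[g30,g31,g32,g33]] := by rfl

theorem scatter_d0 (g00 g01 g02 g03 g10 g11 g12 g13 g20 g21 g22 g23 g30 g31 g32 g33 p q r s : Int) :
    scatter [[g00,g01,g02,g03],[g10,g11,g12,g13],[g20,g21,g22,g23],[g30,g31,g32,g33]] [(0,3),(0,2),(0,1),(0,0)] [p,q,r,s] = [[s,r,q,p],[g10,g11,g12,g13],[g20,g21,g22,g23],[g30,g31,g32,g33]] := by rfl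

theorem scatter_w0 (g00 g01 g02 g03 g10 g11 g12 g13 g20 g21 g22 g23 g30 g31 g32 g33 p q r s : Int) :
    scatter [[g00,g01,g02,g03],[g10,g11,g12,g13],[g20,g21,g22,g23],[g30,g31,g32,g33]] [(0,0),(1,0),(2,0),(3,0)] [p,q,r,s] = [[p,g01,g02,g03],[q,g11,g12,g13],[r,g21,g22,g23],[s,g31,g32,g33]] := by rfl

theorem scatter_s0 (g00 g01 g02 g03 g10 g11 g12 g13 g20 g21 g22 g23 g30 g31 g32 g33 p q r s : Int) :
    scatter [[g00,g01,g02,g03],[g10,g11,g12,g13],[g20,g21,g22,g23],[g30,g31,g32,g33]] [(3,0),(2,0),(1,0),(0,0)] [p,q,r,s] = [[s,g01,g02,g03],[r,g11,g12,g13],[q,g21,g22,g23],[p,g31,g32,g33]] := by rfl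

theorem scatter_a1 (g00 g01 g02 g03 g10 g11 g12 g13 g20 g21 g22 g23 g30 g31 g32 g33 p q r s : Int) :
    scatter [[g00,g01,g02,g03],[g10,g11,g12,g13],[g20,g21,g22,g23],[g30,g31,g32,g33]] [(1,0),(1,1),(1,2),(1,3)] [p,q,r,s] = [[g00,g01,g02,g03],[p,q,r,s],[g20,g21,g22,g23],[g30,g31,g32,g33]] := by rfl

theorem scatter_d1 (g00 g01 g02 g03 g10 g11 g12 g13 g20 g21 g22 g23 g30 g31 g32 g33 p q r s : Int) :
    scatter [[g00,g01,g02,g03],[g10,g11,g12,g13],[g20,g21,g22,g23],[g30,g31,g32,g33]] [(1,3),(1,2),(1,1),(1,0)] [p,q,r,s] = [[g00,g01,g02,g03],[s,r,q,p],[g20,g21,g22,g23],[g30,g31,g32,g33]] := by rfl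

theorem scatter_w1 (g00 g01 g02 g03 g10 g11 g12 g13 g20 g21 g22 g23 g30 g31 g32 g33 p q r s : Int) :
    scatter [[g00,g01,g02,g03],[g10,g11,g12,g13],[g20,g21,g22,g23],[g30,g31,g32,g33]] [(0,1),(1,1),(2,1),(3,1)] [p,q,r,s] = [[g00,p,g02,g03],[g10,q,g12,g13],[g20,r,g22,g23],[g30,s,g32,g33]] := by rfl

theorem scatter_s1 (g00 g01 g02 g03 g10 g11 g12 g13 g20 g21 g22 g23 g30 g31 g32 g33 p q r s : Int) :
    scatter [[g00,g01,g02,g03],[g10,g11,g12,g13],[g20,g21,g22,g23],[g30,g31,g32,g33]] [(3,1),(2,1),(1,1),(0,1)] [p,q,r,s] = [[g00,s,g02,g03],[g10,r,g12,g13],[g20,q,g22,g23],[g30,p,g32,g33]] := by rfl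

theorem scatter_a2 (g00 g01 g02 g03 g10 g11 g12 g13 g20 g21 g22 g23 g30 g31 g32 g33 p q r s : Int) :
    scatter [[g00,g01,g02,g03],[g10,g11,g12,g13],[g20,g21,g22,g23],[g30,g31,g32,g33]] [(2,0),(2,1),(2,2),(2,3)] [p,q,r,s] = [[g00,g01,g02,g03],[g10,g11,g12,g13],[p,q,r,s],[g30,g31,g32,g33]] := by rfl

theorem scatter_d2 (g00 g01 g02 g03 g10 g11 g12 g13 g20 g21 g22 g23 g30 g31 g32 g33 p q r s : Int) :
    scatter [[g00,g01,g02,g03],[g10,g11,g12,g13],[g20,g21,g22,g23],[g30,g31,g32,g33]] [(2,3),(2,2),(2,1),(2,0)] [p,q,r,s] = [[g00,g01,g02,g03],[g10,g11,g12,g13],[s,r,q,p],[g30,g31,g32,g33]] := by rfl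

theorem scatter_w2 (g00 g01 g02 g03 g10 g11 g12 g13 g20 g21 g22 g23 g30 g31 g32 g33 p q r s : Int) :
    scatter [[g00,g01,g02,g03],[g10,g11,g12,g13],[g20,g21,g22,g23],[g30,g31,g32,g33]] [(0,2),(1,2),(2,2),(3,2)] [p,q,r,s] = [[g00,g01,p,g03],[g10,g11,q,g13],[g20,g21,r,g23],[g30,g31,s,g33]] := by rfl

theorem scatter_s2 (g00 g01 g02 g03 g10 g11 g12 g13 g20 g21 g22 g23 g30 g31 g32 g33 p q r s : Int) :
    scatter [[g00,g01,g02,g03],[g10,g11,g12,g13],[g20,g21,g22,g23],[g30,g31,g32,g33]] [(3,2),(2,2),(1,2),(0,2)] [p,q,r,s] = [[g00,g01,s,g03],[g10,g11,r,g13],[g20,g21,q,g23],[g30,g31,p,g33]] := by rfl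

theorem scatter_a3 (g00 g01 g02 g03 g10 g11 g12 g13 g20 g21 g22 g23 g30 g31 g32 g33 p q r s : Int) :
    scatter [[g00,g01,g02,g03],[g10,g11,g12,g13],[g20,g21,g22,g23],[g30,g31,g32,g33]] [(3,0),(3,1),(3,2),(3,3)] [p,q,r,s] = [[g00,g01,g02,g03],[g10,g11,g12,g13],[g20,g21,g22,g23],[p,q,r,s]] := by rfl

theorem scatter_d3 (g00 g01 g02 g03 g10 g11 g12 g13 g20 g21 g22 g23 g30 g31 g32 g33 p q r s : Int) :
    scatter [[g00,g01,g02,g03],[g10,g11,g12,g13],[g20,g21,g22,g23],[g30,g31,g32,g33]] [(3,3),(3,2),(3,1),(3,0)] [p,q,r,s] = [[g00,g01,g02,g03],[g10,g11,g12,g13],[g20,g21,g22,g23],[s,r,q,p]] := by rfl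

theorem scatter_w3 (g00 g01 g02 g03 g10 g11 g12 g13 g20 g21 g22 g23 g30 g31 g32 g33 p q r s : Int) :
    scatter [[g00,g01,g02,g03],[g10,g11,g12,g13],[g20,g21,g22,g23],[g30,g31,g32,g33]] [(0,3),(1,3),(2,3),(3,3)] [p,q,r,s] = [[g00,g01,g02,p],[g10,g11,g12,q],[g20,g21,g22,r],[g30,g31,g32,s]] := by rfl

theorem scatter_s3 (g00 g01 g02 g03 g10 g11 g12 g13 g20 g21 g22 g23 g30 g31 g32 g33 p q r s : Int) :
    scatter [[g00,g01,g02,g03],[g10,g11,g12,g13],[g20,g21,g22,g23],[g30,g31,g32,g33]] [(3,3),(2,3),(1,3),(0,3)] [p,q,r,s] = [[g00,g01,g02,s],[g10,g11,g12,r],[g20,g21,g22,q],[g30,g31,g32,p]] := by rfl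

theorem repl4 : (List.replicate 4 (List.replicate 4 (0:Int))) = [[0,0,0,0],[0,0,0,0],[0,0,0,0],[0,0,0,0]] := by rfl

-- ===== VERDICT (by name: the statement is the Claim_ definition above) =====
set_option maxHeartbeats 4000000 in
theorem tilt_field_spec : Claim_equal_tilt_field := by
  unfold Claim_equal_tilt_field
  intro f cmd _ hpre
  obtain ⟨hcmd, hlen, hrows⟩ := hpre
  unfold Spec_tilt_field
  obtain ⟨R0, R1, R2, R3, tf, rfl⟩ := exists_four f hlen
  have hr0 := hrows R0 (by simp [List.take_succ_cons])
  have hr1 := hrows R1 (by simp [List.take_succ_cons])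
  have hr2 := hrows R2 (by simp [List.take_succ_cons])
  have hr3 := hrows R3 (by simp [List.take_succ_cons])
  obtain ⟨a0,b0,c0,d0,t0,rfl⟩ := exists_four R0 hr0
  obtain ⟨a1,b1,c1,d1,t1,rfl⟩ := exists_four R1 hr1
  obtain ⟨a2,b2,c2,d2,t2,rfl⟩ := exists_four R2 hr2
  obtain ⟨a3,b3,c3,d3,t3,rfl⟩ := exists_four R3 hr3
  rcases hcmd with rfl | rfl | rfl | rfl
  · -- "w"
    rw [tilt_field, tilt_field_alt, show List.range 4 = [0,1,2,3] from rfl]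
    simp only [List.foldl_cons, List.foldl_nil, tiltStep_slide, altStep, String.reduceEq,
        if_true, if_false, ite_true, ite_false, coords_w, List.map_cons, List.map_nil, repl4, cell00, cell01, cell02, cell03, cell10, cell11, cell12, cell13, cell20, cell21, cell22, cell23, cell30, cell31, cell32, cell33,
        getnums_col0, getnums_col1, getnums_col2, getnums_col3, rev4, get_new_field_eq]
    generalize hL0 : slide [a0,a1,a2,a3] 0 = L0
    generalize hL1 : slide [b0,b1,b2,b3] 0 = L1
    generalize hL2 : slide [c0,c1,c2,c3] 0 = L2
    generalize hL3 : slide [d0,d1,d2,d3] 0 = L3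
    obtain ⟨p0,q0,r0,s0,rfl⟩ := exists_four_of_len L0 (by rw [← hL0, slide_length]; rfl)
    obtain ⟨p1,q1,r1,s1,rfl⟩ := exists_four_of_len L1 (by rw [← hL1, slide_length]; rfl)
    obtain ⟨p2,q2,r2,s2,rfl⟩ := exists_four_of_len L2 (by rw [← hL2, slide_length]; rfl)
    obtain ⟨p3,q3,r3,s3,rfl⟩ := exists_four_of_len L3 (by rw [← hL3, slide_length]; rfl)
    simp only [sert_col0_false, sert_col1_false, sert_col2_false, sert_col3_false, scatter_w0, scatter_w1, scatter_w2, scatter_w3]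
  · -- "a"
    rw [tilt_field, tilt_field_alt, show List.range 4 = [0,1,2,3] from rfl]
    simp only [List.foldl_cons, List.foldl_nil, tiltStep_slide, altStep, String.reduceEq,
        if_true, if_false, ite_true, ite_false, coords_a, List.map_cons, List.map_nil, repl4, cell00, cell01, cell02, cell03, cell10, cell11, cell12, cell13, cell20, cell21, cell22, cell23, cell30, cell31, cell32, cell33,
        getnums_row0, getnums_row1, getnums_row2, getnums_row3, rev4, get_new_field_eq]
    generalize hL0 : slide [a0,b0,c0,d0] 0 = L0
    generalize hL1 : slide [a1,b1,c1,d1] 0 = L1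
    generalize hL2 : slide [a2,b2,c2,d2] 0 = L2
    generalize hL3 : slide [a3,b3,c3,d3] 0 = L3
    obtain ⟨p0,q0,r0,s0,rfl⟩ := exists_four_of_len L0 (by rw [← hL0, slide_length]; rfl)
    obtain ⟨p1,q1,r1,s1,rfl⟩ := exists_four_of_len L1 (by rw [← hL1, slide_length]; rfl)
    obtain ⟨p2,q2,r2,s2,rfl⟩ := exists_four_of_len L2 (by rw [← hL2, slide_length]; rfl)
    obtain ⟨p3,q3,r3,s3,rfl⟩ := exists_four_of_len L3 (by rw [← hL3, slide_length]; rfl)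
    simp only [sert_row0_false, sert_row1_false, sert_row2_false, sert_row3_false, scatter_a0, scatter_a1, scatter_a2, scatter_a3]
  · -- "s"
    rw [tilt_field, tilt_field_alt, show List.range 4 = [0,1,2,3] from rfl]
    simp only [List.foldl_cons, List.foldl_nil, tiltStep_slide, altStep, String.reduceEq,
        if_true, if_false, ite_true, ite_false, coords_s, List.map_cons, List.map_nil, repl4, cell00, cell01, cell02, cell03, cell10, cell11, cell12, cell13, cell20, cell21, cell22, cell23, cell30, cell31, cell32, cell33,
        getnums_col0, getnums_col1, getnums_col2, getnums_col3, rev4, get_new_field_eq]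
    generalize hL0 : slide [a3,a2,a1,a0] 0 = L0
    generalize hL1 : slide [b3,b2,b1,b0] 0 = L1
    generalize hL2 : slide [c3,c2,c1,c0] 0 = L2
    generalize hL3 : slide [d3,d2,d1,d0] 0 = L3
    obtain ⟨p0,q0,r0,s0,rfl⟩ := exists_four_of_len L0 (by rw [← hL0, slide_length]; rfl)
    obtain ⟨p1,q1,r1,s1,rfl⟩ := exists_four_of_len L1 (by rw [← hL1, slide_length]; rfl)
    obtain ⟨p2,q2,r2,s2,rfl⟩ := exists_four_of_len L2 (by rw [← hL2, slide_length]; rfl)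
    obtain ⟨p3,q3,r3,s3,rfl⟩ := exists_four_of_len L3 (by rw [← hL3, slide_length]; rfl)
    simp only [sert_col0_true, sert_col1_true, sert_col2_true, sert_col3_true, scatter_s0, scatter_s1, scatter_s2, scatter_s3]
  · -- "d"
    rw [tilt_field, tilt_field_alt, show List.range 4 = [0,1,2,3] from rfl]
    simp only [List.foldl_cons, List.foldl_nil, tiltStep_slide, altStep, String.reduceEq,
        if_true, if_false, ite_true, ite_false, coords_d, List.map_cons, List.map_nil, repl4, cell00, cell01, cell02, cell03, cell10, cell11, cell12, cell13, cell20, cell21, cell22, cell23, cell30, cell31, cell32, cell33,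
        getnums_row0, getnums_row1, getnums_row2, getnums_row3, rev4, get_new_field_eq]
    generalize hL0 : slide [d0,c0,b0,a0] 0 = L0
    generalize hL1 : slide [d1,c1,b1,a1] 0 = L1
    generalize hL2 : slide [d2,c2,b2,a2] 0 = L2
    generalize hL3 : slide [d3,c3,b3,a3] 0 = L3
    obtain ⟨p0,q0,r0,s0,rfl⟩ := exists_four_of_len L0 (by rw [← hL0, slide_length]; rfl)
    obtain ⟨p1,q1,r1,s1,rfl⟩ := exists_four_of_len L1 (by rw [← hL1, slide_length]; rfl)
    obtain ⟨p2,q2,r2,s2,rfl⟩ := exists_four_of_len L2 (by rw [← hL2, slide_length]; rfl)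
    obtain ⟨p3,q3,r3,s3,rfl⟩ := exists_four_of_len L3 (by rw [← hL3, slide_length]; rfl)
    simp only [sert_row0_true, sert_row1_true, sert_row2_true, sert_row3_true, scatter_d0, scatter_d1, scatter_d2, scatter_d3]
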